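-- pv_equiv track=rewrite | github.com/cxaexeong/codingtest-practice | 프로그래머스/1/138477. 명예의 전당 （1）/명예의 전당 （1）.py | solution
-- ===== SOURCE A (Python) =====
-- def solution(k, score):
--     hall_of_fame = []  # 명예의 전당 리스트
--     result = []        # 최하위 점수 기록
--
--     for s in score:
--         hall_of_fame.append(s)             # 새로운 점수 추가
--         hall_of_fame = sorted(hall_of_fame, reverse=True)  # 내림차순 정렬
--         if len(hall_of_fame) > k:          # 상위 k명만 유지
--             hall_of_fame.pop()             # 최하위 제거
--         result.append(hall_of_fame[-1])    # 명예의 전당 최하위 점수 기록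
--
--     return result
-- ===== SOURCE B (Python) =====
-- def solution(k, score):
--     hall = []   # all scores seen so far, ascending (never trimmed)
--     result = []
--     for s in score:
--         i = 0
--         while i < len(hall) and hall[i] < s:
--             i += 1
--         hall.insert(i, s)  # keep hall sorted ascending
--         result.append(hall[-k] if len(hall) >= k else hall[0])
--     return result
-- ===== Notes on version B (the rewrite author's own statement) =====
-- stated objective: alternative
-- what changed: B replaces A's per-step re-sort of a trimmed top-k list (append, sorted(reverse=True), pop) by one untrimmed ascending list maintained with an in-place ordered insertion, reading each step's answer directly by index: hall[-k] once k scores exist, else hall[0].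
import Mathlib
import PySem

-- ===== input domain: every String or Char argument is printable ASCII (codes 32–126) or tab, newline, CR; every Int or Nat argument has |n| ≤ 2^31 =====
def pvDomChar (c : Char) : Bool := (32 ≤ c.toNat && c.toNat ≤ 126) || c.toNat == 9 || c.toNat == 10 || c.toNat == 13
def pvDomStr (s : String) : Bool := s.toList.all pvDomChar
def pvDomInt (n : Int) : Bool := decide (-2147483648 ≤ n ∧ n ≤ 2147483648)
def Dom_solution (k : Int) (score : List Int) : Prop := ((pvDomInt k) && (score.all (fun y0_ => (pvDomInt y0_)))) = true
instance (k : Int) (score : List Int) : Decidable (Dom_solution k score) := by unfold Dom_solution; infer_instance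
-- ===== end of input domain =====

-- B keeps ONE untrimmed, incrementally insertion-sorted list of all scores and reads the
-- threshold by index, instead of A's re-sort + trim of a top-k list each step (objective: alternative).

-- ===== PORT A =====
-- loop body of A: append, sort descending, trim to k (pop last), record hall[-1]
def solutionStep (k : Int) (st : List Int × List Int) (s : Int) : List Int × List Int :=
  let h1 := st.1 ++ [s]
  let h2 := PySem.List.sorted h1 (fun x => x) true
  let h3 := if (h2.length : Int) > k then
      (match PySem.List.pop? h2 (-1) with
       | some r => r.2
       | none => h2)   -- pop of an empty list: unreachable (h2 is never empty here)
    else h2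
  -- hall_of_fame[-1]: getD's 0 is never used inside Pre_ (h3 nonempty there)
  (h3, st.2 ++ [(PySem.List.pyGet? h3 (-1)).getD 0])

def solution (k : Int) (score : List Int) : List Int :=
  (score.foldl (solutionStep k) ([], [])).2

-- ===== PORT B =====
-- the while-loop of Source B that scans to the insertion point and inserts, as structural recursion
def insertAsc (s : Int) : List Int → List Int
  | [] => [s]
  | x :: xs => if x < s then x :: insertAsc s xs else s :: x :: xs

def solutionAltStep (k : Int) (st : List Int × List Int) (s : Int) : List Int × List Int :=
  let h := insertAsc s st.1
  let t := if (h.length : Int) ≥ k then (PySem.List.pyGet? h (-k)).getD 0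
           else (PySem.List.pyGet? h 0).getD 0   -- getD's 0 never used: h is nonempty
  (h, st.2 ++ [t])

def solution_alt (k : Int) (score : List Int) : List Int :=
  (score.foldl (solutionAltStep k) ([], [])).2

-- ===== PRECONDITION & SPEC =====
-- A raises IndexError (hall_of_fame[-1] on an emptied list) whenever k ≤ 0 and score is
-- nonempty; Pre_ excludes exactly those inputs. A returns normally everywhere else.
def Pre_solution (k : Int) (score : List Int) : Prop := 1 ≤ k ∨ score = []
instance (k : Int) (score : List Int) : Decidable (Pre_solution k score) := by unfold Pre_solution; infer_instance
def pvWitness_solution : Int × List Int := (3, [10, 100, 20, 150, 1, 100, 200])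

def Spec_solution (k : Int) (score : List Int) (out : List Int) : Prop := out = solution_alt k score
instance (k : Int) (score : List Int) (out : List Int) : Decidable (Spec_solution k score out) := by unfold Spec_solution; infer_instance

-- ===== CLAIM (what is proved, stated in full; the proofs are below) =====
def Claim_equal_solution : Prop := ∀ (k : Int) (score : List Int), Dom_solution k score → Pre_solution k score → Spec_solution k score (solution k score)

-- ===== LEMMAS AND PROOFS =====

-- descending-order counterpart of insertAsc (proof device for A's sort-of-an-almost-sorted list)
def insDesc (s : Int) : List Int → List Int
  | [] => [s]
  | x :: xs => if s ≤ x then x :: insDesc s xs else s :: x :: xs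

theorem insDesc_perm (s : Int) (R : List Int) : (insDesc s R).Perm (s :: R) := by
  induction R with
  | nil => simp [insDesc]
  | cons x xs ih =>
    simp only [insDesc]
    split
    · exact ((ih.cons x).trans (List.Perm.swap s x xs))
    · exact List.Perm.refl _

theorem insDesc_length (s : Int) (R : List Int) : (insDesc s R).length = R.length + 1 :=
  (insDesc_perm s R).length_eq

theorem insDesc_ne_nil (s : Int) (R : List Int) : insDesc s R ≠ [] := by
  cases R with
  | nil => simp [insDesc]
  | cons x xs => simp only [insDesc]; split <;> simp

theorem mem_insDesc {y s : Int} {R : List Int} (h : y ∈ insDesc s R) : y = s ∨ y ∈ R := by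
  have := (insDesc_perm s R).mem_iff.mp h
  simpa using this

theorem insDesc_pairwise (s : Int) (R : List Int) (h : R.Pairwise (fun a b => b ≤ a)) :
    (insDesc s R).Pairwise (fun a b => b ≤ a) := by
  induction R with
  | nil => simp [insDesc]
  | cons x xs ih =>
    simp only [insDesc]
    rcases List.pairwise_cons.mp h with ⟨hx, hxs⟩
    split
    · rename_i hsx
      refine List.pairwise_cons.mpr ⟨?_, ih hxs⟩
      intro y hy
      rcases mem_insDesc hy with rfl | hy
      · exact hsx
      · exact hx y hy
    · rename_i hsx
      have hxs' : x ≤ s := le_of_lt (lt_of_not_ge hsx)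
      refine List.pairwise_cons.mpr ⟨?_, h⟩
      intro y hy
      rcases List.mem_cons.mp hy with rfl | hy
      · exact hxs'
      · exact le_trans (hx y hy) hxs'

theorem sortD_append_singleton (s : Int) (R : List Int)
    (h : R.Pairwise (fun a b => b ≤ a)) :
    PySem.List.sorted (R ++ [s]) (fun x => x) true = insDesc s R := by
  have hp1 : (R ++ [s]).Perm (insDesc s R) :=
    (List.perm_append_singleton s R).trans (insDesc_perm s R).symm
  apply PySem.List.eq_of_perm_of_pairwise_le_of_injective (fun x : Int => -x) neg_injective
  · exact (PySem.List.sorted_perm _ _ _).trans hp1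
  · exact (PySem.List.sorted_pairwise_rev (R ++ [s]) (fun x : Int => x)).imp
      (fun h => by simpa using h)
  · exact (insDesc_pairwise s R h).imp (fun h => by simpa using h)

theorem insDesc_dropLast_take (s : Int) (R : List Int) (K : Nat) (hK : K ≤ R.length) :
    (insDesc s (R.take K)).dropLast = (insDesc s R).take K := by
  induction R generalizing K with
  | nil =>
    have : K = 0 := Nat.le_zero.mp hK
    subst this; simp [insDesc]
  | cons x xs ih =>
    cases K with
    | zero => simp [insDesc]
    | succ K' =>
      have hK' : K' ≤ xs.length := by simpa using hK
      simp only [List.take_succ_cons, insDesc]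
      split
      · rw [List.dropLast_cons_of_ne_nil (insDesc_ne_nil s (xs.take K'))]
        rw [ih _ hK']
        simp [List.take_succ_cons]
      · rw [List.dropLast_eq_take]
        simp only [List.length_cons, List.length_take]
        rw [Nat.min_eq_left hK']
        have h1 : K' + 1 + 1 - 1 = K' + 1 := rfl
        rw [h1]
        cases K' with
        | zero => simp
        | succ m =>
          simp only [List.take_succ_cons, List.take_take]
          rw [Nat.min_eq_left (by omega : m ≤ m + 1)]

theorem insDesc_append_of_lt (s x : Int) (hx : x < s) (T : List Int) :
    insDesc s (T ++ [x]) = insDesc s T ++ [x] := by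
  induction T with
  | nil => simp [insDesc, not_le.mpr hx]
  | cons y T' ih =>
    simp only [List.cons_append, insDesc]
    split
    · rw [ih]; simp
    · simp

theorem insDesc_of_forall_le (s : Int) (T : List Int) (h : ∀ t ∈ T, s ≤ t) :
    insDesc s T = T ++ [s] := by
  induction T with
  | nil => rfl
  | cons y T' ih =>
    simp only [insDesc, if_pos (h y (by simp))]
    rw [ih (fun t ht => h t (by simp [ht]))]
    rfl

theorem rev_insertAsc (s : Int) (H : List Int) (hs : H.Pairwise (· ≤ ·)) :
    (insertAsc s H).reverse = insDesc s H.reverse := by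
  induction H with
  | nil => simp [insertAsc, insDesc]
  | cons x H' ih =>
    rcases List.pairwise_cons.mp hs with ⟨hx, hs'⟩
    simp only [insertAsc]
    split
    · rename_i hxs
      rw [List.reverse_cons, ih hs', ← insDesc_append_of_lt s x hxs, List.reverse_cons]
    · rename_i hxs
      have hsx : s ≤ x := not_lt.mp hxs
      rw [insDesc_of_forall_le s ((x :: H').reverse)
        (by intro t ht
            rcases List.mem_cons.mp (List.mem_reverse.mp ht) with rfl | ht'
            · exact hsx
            · exact le_trans hsx (hx t ht'))]
      simp

theorem insertAsc_length (s : Int) (H : List Int) : (insertAsc s H).length = H.length + 1 := by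
  induction H with
  | nil => simp [insertAsc]
  | cons x xs ih => simp only [insertAsc]; split <;> simp [ih]

theorem insertAsc_pairwise (s : Int) (H : List Int) (hs : H.Pairwise (· ≤ ·)) :
    (insertAsc s H).Pairwise (· ≤ ·) := by
  have h1 : (insertAsc s H).reverse.Pairwise (fun a b => b ≤ a) := by
    rw [rev_insertAsc s H hs]
    exact insDesc_pairwise s H.reverse (List.pairwise_reverse.mpr hs)
  exact List.pairwise_reverse.mp h1

theorem pop_neg_one (L : List Int) (h : L ≠ []) :
    PySem.List.pop? L (-1) = some (L.getLast h, L.dropLast) := by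
  conv_lhs => rw [← List.dropLast_append_getLast h]
  rw [PySem.List.pop?_last]

-- the appended values of one step agree
theorem threshold_eq (k : Int) (hk : 1 ≤ k) (H' : List Int) (hne : H' ≠ []) :
    (PySem.List.pyGet? ((H'.reverse).take k.toNat) (-1)).getD 0
      = (if (H'.length : Int) ≥ k then (PySem.List.pyGet? H' (-k)).getD 0
         else (PySem.List.pyGet? H' 0).getD 0) := by
  have hkK : k = (k.toNat : Int) := (Int.toNat_of_nonneg (by omega)).symm
  have hK1 : 1 ≤ k.toNat := by omega
  have hlen : 1 ≤ H'.length := List.length_pos_iff.mpr hne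
  rw [PySem.List.pyGet?_neg_one, PySem.List.pyGet?_zero]
  by_cases hge : (H'.length : Int) ≥ k
  · have hKlen : k.toNat ≤ H'.length := by omega
    rw [if_pos hge, show -k = -((k.toNat : Int)) by omega, PySem.List.pyGet?_neg_natCast H' k.toNat hK1 hKlen]
    have hlenT : ((H'.reverse).take k.toNat).length = k.toNat := by
      simp [List.length_take]; omega
    rw [List.getLast?_eq_getElem?, hlenT]
    rw [List.getElem?_take_of_lt (by omega : k.toNat - 1 < k.toNat)]
    rw [List.getElem?_reverse (by omega : k.toNat - 1 < H'.length)]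
    have : H'.length - 1 - (k.toNat - 1) = H'.length - k.toNat := by omega
    rw [this]
  · rw [if_neg hge]
    rw [List.take_of_length_le (by simp; omega)]
    rw [List.getLast?_reverse, List.head?_eq_getElem?]

theorem step_eq (k : Int) (hk : 1 ≤ k) (H acc : List Int) (hs : H.Pairwise (· ≤ ·)) (s : Int) :
    solutionStep k ((H.reverse).take k.toNat, acc) s
      = (((insertAsc s H).reverse).take k.toNat, (solutionAltStep k (H, acc) s).2) := by
  have hkK : k = (k.toNat : Int) := (Int.toNat_of_nonneg (by omega)).symm
  have hdesc : ((H.reverse).take k.toNat).Pairwise (fun a b => b ≤ a) :=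
    (List.pairwise_reverse.mpr (by simpa using hs)).take
  have hsort : PySem.List.sorted ((H.reverse).take k.toNat ++ [s]) (fun x => x) true
      = insDesc s ((H.reverse).take k.toNat) := sortD_append_singleton s _ hdesc
  have hrev := rev_insertAsc s H hs
  have hne' : insertAsc s H ≠ [] := by
    intro h
    have := insertAsc_length s H
    rw [h] at this
    simp at this
  have hhall : (if (((insDesc s ((H.reverse).take k.toNat)).length : Int) > k)
      then (match PySem.List.pop? (insDesc s ((H.reverse).take k.toNat)) (-1) with
            | some r => r.2 | none => insDesc s ((H.reverse).take k.toNat))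
      else insDesc s ((H.reverse).take k.toNat))
      = ((insertAsc s H).reverse).take k.toNat := by
    by_cases hn : k.toNat ≤ H.length
    · rw [if_pos (by rw [insDesc_length]; simp [List.length_take]; omega)]
      have hneL : insDesc s ((H.reverse).take k.toNat) ≠ [] := insDesc_ne_nil s _
      rw [pop_neg_one _ hneL]
      rw [insDesc_dropLast_take s H.reverse k.toNat (by simpa using hn), hrev]
    · rw [if_neg (by rw [insDesc_length]; simp [List.length_take]; omega)]
      rw [List.take_of_length_le (by simp; omega)]
      rw [List.take_of_length_le (by simp [insertAsc_length]; omega)]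
      rw [hrev]
  simp only [solutionStep, solutionAltStep]
  rw [hsort, hhall]
  refine Prod.ext rfl ?_
  rw [threshold_eq k hk (insertAsc s H) hne']

theorem loop_eq (k : Int) (hk : 1 ≤ k) (sc : List Int) :
    ∀ (H acc : List Int), H.Pairwise (· ≤ ·) →
    (sc.foldl (solutionStep k) ((H.reverse).take k.toNat, acc)).2
      = (sc.foldl (solutionAltStep k) (H, acc)).2 := by
  induction sc with
  | nil => intro H acc _; rfl
  | cons s sc ih =>
    intro H acc hs
    simp only [List.foldl_cons]
    rw [step_eq k hk H acc hs s]
    have h2 : solutionAltStep k (H, acc) s = (insertAsc s H, (solutionAltStep k (H, acc) s).2) := rfl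
    rw [h2]
    exact ih (insertAsc s H) _ (insertAsc_pairwise s H hs)

-- ===== VERDICT (by name: the statement is the Claim_ definition above) =====
theorem solution_spec : Claim_equal_solution := by
  intro k score _dom pre
  unfold Spec_solution
  rcases pre with hk | rfl
  · have := loop_eq k hk score [] [] (by simp)
    simpa [solution, solution_alt] using this
  · rfl
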